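-- pv_equiv track=rewrite | github.com/open-mmlab/AnyControl | src/train/dataset.py | get_task_groups
-- ===== SOURCE A (Python) =====
-- def get_task_groups(exist_tasks):
--     task_groups = dict()
--     for task in exist_tasks:
--         if task in ['canny', 'hed', 'sketch', 'hedsketch']:
--             if 'edge' not in task_groups:
--                 task_groups['edge'] = []
--             task_groups['edge'].append(task)
--         if task in ['depth']:
--             if 'depth' not in task_groups:
--                 task_groups['depth'] = []
--             task_groups['depth'].append(task)
--         if task in ['seg']:
--             if 'seg' not in task_groups:
--                 task_groups['seg'] = []
--             task_groups['seg'].append(task)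
--         if task in ['openpose', 'dwpose']:
--             if 'pose' not in task_groups:
--                 task_groups['pose'] = []
--             task_groups['pose'].append(task)
--     return task_groups
-- ===== SOURCE B (Python) =====
-- _CATEGORY = {'canny': 'edge', 'hed': 'edge', 'sketch': 'edge', 'hedsketch': 'edge',
--              'depth': 'depth', 'seg': 'seg', 'openpose': 'pose', 'dwpose': 'pose'}
--
--
-- def get_task_groups(exist_tasks):
--     cats = []
--     for task in exist_tasks:
--         cat = _CATEGORY.get(task)
--         if cat is not None and cat not in cats:
--             cats.append(cat)
--     return {cat: [task for task in exist_tasks if _CATEGORY.get(task) == cat]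
--             for cat in cats}
-- ===== Notes on version B (the rewrite author's own statement) =====
-- stated objective: simpler
-- what changed: A's four hard-coded sequential if/setdefault/append branches inside one task loop are replaced by a static task-to-category dict: one pass collects the categories hit (first-encounter order), then each group is a list-comprehension filter of the tasks.
import Mathlib
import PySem

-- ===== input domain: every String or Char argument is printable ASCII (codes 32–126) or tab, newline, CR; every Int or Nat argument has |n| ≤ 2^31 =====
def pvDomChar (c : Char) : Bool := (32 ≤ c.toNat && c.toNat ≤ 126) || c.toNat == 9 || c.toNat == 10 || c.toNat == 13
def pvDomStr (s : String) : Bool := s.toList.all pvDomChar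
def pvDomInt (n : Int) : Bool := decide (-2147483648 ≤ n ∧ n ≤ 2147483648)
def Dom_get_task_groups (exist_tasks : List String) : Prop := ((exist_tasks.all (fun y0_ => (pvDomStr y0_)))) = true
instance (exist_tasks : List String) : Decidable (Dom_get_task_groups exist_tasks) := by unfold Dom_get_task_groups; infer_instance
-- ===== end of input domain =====

-- B replaces A's single task-pass with four sequential membership branches by a static task→category map:
-- one pass collects the hit categories in first-encounter order, then each group is a filter of the task list (alternative decomposition).

-- ===== PORT A =====
-- A's loop body (the four sequential membership branches), one fold step
def pvAStep (task_groups : PySem.Dict String (List String)) (task : String) : PySem.Dict String (List String) :=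
  let task_groups :=
    if ["canny", "hed", "sketch", "hedsketch"].contains task then
      let task_groups := if task_groups.contains "edge" = false then task_groups.insert "edge" ([] : List String) else task_groups
      task_groups.modify "edge" [] (fun l => l ++ [task])
    else task_groups
  let task_groups :=
    if ["depth"].contains task then
      let task_groups := if task_groups.contains "depth" = false then task_groups.insert "depth" ([] : List String) else task_groups
      task_groups.modify "depth" [] (fun l => l ++ [task])
    else task_groups
  let task_groups :=
    if ["seg"].contains task then
      let task_groups := if task_groups.contains "seg" = false then task_groups.insert "seg" ([] : List String) else task_groups
      task_groups.modify "seg" [] (fun l => l ++ [task])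
    else task_groups
  if ["openpose", "dwpose"].contains task then
    let task_groups := if task_groups.contains "pose" = false then task_groups.insert "pose" ([] : List String) else task_groups
    task_groups.modify "pose" [] (fun l => l ++ [task])
  else task_groups

def get_task_groups (exist_tasks : List String) : List (String × List String) :=
  (exist_tasks.foldl pvAStep PySem.Dict.empty).items

-- ===== PORT B =====
-- B's static mapping task → category (_CATEGORY in Source B)
def pvCATEGORY : PySem.Dict String String := PySem.Dict.ofList
  [("canny", "edge"), ("hed", "edge"), ("sketch", "edge"), ("hedsketch", "edge"),
   ("depth", "depth"), ("seg", "seg"), ("openpose", "pose"), ("dwpose", "pose")]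

def get_task_groups_alt (exist_tasks : List String) : List (String × List String) :=
  let cats := exist_tasks.foldl (fun cats task =>
    match pvCATEGORY.get? task with
    | some cat => if cats.contains cat then cats else cats ++ [cat]
    | none => cats) []
  cats.map (fun cat => (cat, exist_tasks.filter (fun task => pvCATEGORY.get? task == some cat)))

-- ===== PRECONDITION & SPEC =====
def Spec_get_task_groups (exist_tasks : List String) (out : List (String × List String)) : Prop := out = get_task_groups_alt exist_tasks
instance (exist_tasks : List String) (out : List (String × List String)) : Decidable (Spec_get_task_groups exist_tasks out) := by unfold Spec_get_task_groups; infer_instance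

-- ===== CLAIM (what is proved, stated in full; the proofs are below) =====
def Claim_equal_get_task_groups : Prop := ∀ (exist_tasks : List String), Dom_get_task_groups exist_tasks → Spec_get_task_groups exist_tasks (get_task_groups exist_tasks)

-- ===== LEMMAS AND PROOFS =====

-- A's per-task 'setdefault then append' collapses to a single defaulted modify
theorem pvModify_absorb (d : PySem.Dict String (List String)) (k t : String) :
    PySem.Dict.modify (if d.contains k = false then d.insert k ([] : List String) else d) k [] (fun l => l ++ [t])
      = d.modify k [] (fun l => l ++ [t]) := by
  by_cases hc : d.contains k
  · simp [hc]
  · simp only [Bool.not_eq_true] at hc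
    simp [hc, PySem.Dict.modify, PySem.Dict.getD_insert_self, PySem.Dict.insert_insert_self,
      PySem.Dict.getD_of_not_contains (d := d) (h := hc)]

-- A's step, rewritten through B's category map (the four membership lists are its fibres)
set_option maxRecDepth 4000 in
theorem pvAStep_eq (d : PySem.Dict String (List String)) (t : String) :
    pvAStep d t = match pvCATEGORY.get? t with
      | some c => d.modify c [] (fun l => l ++ [t])
      | none => d := by
  by_cases h1 : t = "canny"; · subst h1; simp [pvAStep, pvCATEGORY, pvModify_absorb]; rfl
  by_cases h2 : t = "hed"; · subst h2; simp [pvAStep, pvCATEGORY, pvModify_absorb]; rfl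
  by_cases h3 : t = "sketch"; · subst h3; simp [pvAStep, pvCATEGORY, pvModify_absorb]; rfl
  by_cases h4 : t = "hedsketch"; · subst h4; simp [pvAStep, pvCATEGORY, pvModify_absorb]; rfl
  by_cases h5 : t = "depth"; · subst h5; simp [pvAStep, pvCATEGORY, pvModify_absorb]; rfl
  by_cases h6 : t = "seg"; · subst h6; simp [pvAStep, pvCATEGORY, pvModify_absorb]; rfl
  by_cases h7 : t = "openpose"; · subst h7; simp [pvAStep, pvCATEGORY, pvModify_absorb]; rfl
  by_cases h8 : t = "dwpose"; · subst h8; simp [pvAStep, pvCATEGORY, pvModify_absorb]; rfl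
  have hm : pvCATEGORY = PySem.Dict.mk
      [("canny", "edge"), ("hed", "edge"), ("sketch", "edge"), ("hedsketch", "edge"),
       ("depth", "depth"), ("seg", "seg"), ("openpose", "pose"), ("dwpose", "pose")] := by rfl
  have hn : pvCATEGORY.get? t = none := by
    have c1 := beq_eq_false_iff_ne.mpr (Ne.symm h1)
    have c2 := beq_eq_false_iff_ne.mpr (Ne.symm h2)
    have c3 := beq_eq_false_iff_ne.mpr (Ne.symm h3)
    have c4 := beq_eq_false_iff_ne.mpr (Ne.symm h4)
    have c5 := beq_eq_false_iff_ne.mpr (Ne.symm h5)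
    have c6 := beq_eq_false_iff_ne.mpr (Ne.symm h6)
    have c7 := beq_eq_false_iff_ne.mpr (Ne.symm h7)
    have c8 := beq_eq_false_iff_ne.mpr (Ne.symm h8)
    rw [hm]
    simp only [PySem.Dict.get?_mk_cons, c1, c2, c3, c4, c5, c6, c7, c8, if_false,
      Bool.false_eq_true]
    rfl
  simp [pvAStep, hn, h1, h2, h3, h4, h5, h6, h7, h8]

-- the tagged pairs (category, task) of the tasks that hit some category
def pvPairs (exist_tasks : List String) : List (String × String) :=
  exist_tasks.filterMap (fun t => (pvCATEGORY.get? t).map (fun c => (c, t)))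

-- A's fold is the generic (category, task)-pairs modify-fold
theorem pvAFold_eq (ts : List String) (d : PySem.Dict String (List String)) :
    ts.foldl pvAStep d = (pvPairs ts).foldl (fun d p => d.modify p.1 [] (fun l => l ++ [p.2])) d := by
  induction ts generalizing d with
  | nil => rfl
  | cons t ts ih =>
    simp only [pvPairs] at ih ⊢
    rcases h : pvCATEGORY.get? t with _ | c <;>
      simp only [List.filterMap_cons, h, Option.map_some, Option.map_none, List.foldl_cons,
        pvAStep_eq, ih]

-- B's cats loop is Set.update over the pair keys
theorem pvCats_eq (ts : List String) (acc : List String) :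
    ts.foldl (fun cats task =>
      match pvCATEGORY.get? task with
      | some cat => if cats.contains cat then cats else cats ++ [cat]
      | none => cats) acc = PySem.Set.update acc ((pvPairs ts).map Prod.fst) := by
  induction ts generalizing acc with
  | nil => rfl
  | cons t ts ih =>
    simp only [pvPairs] at ih ⊢
    rcases h : pvCATEGORY.get? t with _ | c
    · simp only [List.filterMap_cons, h, Option.map_none, List.foldl_cons, ih]
    · simp only [List.filterMap_cons, h, Option.map_some, List.foldl_cons,
        List.map_cons, PySem.Set.update_cons, ih]
      rfl

-- projecting the pairs with a fixed category gives B's filter of the task list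
theorem pvFilter_eq (ts : List String) (c : String) :
    ((pvPairs ts).filter (fun p => p.1 == c)).map (·.2)
      = ts.filter (fun t => pvCATEGORY.get? t == some c) := by
  induction ts with
  | nil => rfl
  | cons t ts ih =>
    simp only [pvPairs] at ih ⊢
    rcases h : pvCATEGORY.get? t with _ | c'
    · simp [h, ih]
    · by_cases hc : c' = c
      · subst hc; simp [List.filter_cons, h, ih]
      · simp [h, hc, ih]

theorem pv_main (ts : List String) : get_task_groups ts = get_task_groups_alt ts := by
  unfold get_task_groups get_task_groups_alt
  rw [pvAFold_eq, pvCats_eq]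
  have hnd : ((pvPairs ts).foldl (fun d p => d.modify p.1 [] (fun l => l ++ [p.2]))
      PySem.Dict.empty).keys.Nodup := by
    apply PySem.Dict.nodup_keys_foldl_modify_key
    simp
  rw [PySem.Dict.items_eq_map_keys _ hnd ([] : List String)]
  rw [PySem.Dict.keys_foldl_modify_key]
  have hfun : (fun k => (k, ((pvPairs ts).foldl (fun d p => d.modify p.1 [] (fun l => l ++ [p.2]))
        PySem.Dict.empty).getD k ([] : List String)))
      = (fun cat => (cat, ts.filter (fun task => pvCATEGORY.get? task == some cat))) := by
    funext k
    rw [PySem.Dict.getD_foldl_modify_append, PySem.Dict.getD_empty]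
    simp [pvFilter_eq]
  rw [hfun]
  simp [PySem.Dict.keys_empty]

-- ===== VERDICT (by name: the statement is the Claim_ definition above) =====
theorem get_task_groups_spec : Claim_equal_get_task_groups := by
  intro ts _
  unfold Spec_get_task_groups
  exact pv_main ts
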